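-- pv_equiv track=rewrite | github.com/anaticulae/utilo | utila/group.py | groupby_neighbors
-- ===== SOURCE A (Python) =====
-- def groupby_neighbors(items: list) -> list:
--     """\
--     >>> groupby_neighbors(([], [1, 2, 3], [], [], None, [5], [6], [7]))
--     [[1, 2, 3], [5, 6, 7]]
--     """
--     if not items:
--         return []
--     result = []
--     collected = []
--     for item in items:
--         if item not in (None, [], ''):
--             collected.extend(item)
--         else:
--             if collected:
--                 result.append(collected)
--                 collected = []
--     if collected:
--         result.append(collected)
--     return result
-- ===== SOURCE B (Python) =====
-- def groupby_neighbors(items: list) -> list: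
--     """Two staged passes: first record the indices of all separator items
--     (None/[]/''), then slice the input between consecutive boundaries and
--     flatten each non-trivial slice."""
--     items = list(items)
--     seps = [i for i, it in enumerate(items) if it in (None, [], '')]
--     bounds = [-1] + seps + [len(items)]
--     result = []
--     for a, b in zip(bounds, bounds[1:]):
--         if b - a > 1:
--             result.append([x for it in items[a + 1:b] for x in it])
--     return result
-- ===== Notes on version B (the rewrite author's own statement) =====
-- stated objective: alternative
-- what changed: Replaces A's single-pass result/collected accumulator loop by two staged passes: first enumerate the indices of all separator items, then slice the input between consecutive boundaries (with sentinels -1 and len) and flatten each slice of length > 0.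
import Mathlib
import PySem

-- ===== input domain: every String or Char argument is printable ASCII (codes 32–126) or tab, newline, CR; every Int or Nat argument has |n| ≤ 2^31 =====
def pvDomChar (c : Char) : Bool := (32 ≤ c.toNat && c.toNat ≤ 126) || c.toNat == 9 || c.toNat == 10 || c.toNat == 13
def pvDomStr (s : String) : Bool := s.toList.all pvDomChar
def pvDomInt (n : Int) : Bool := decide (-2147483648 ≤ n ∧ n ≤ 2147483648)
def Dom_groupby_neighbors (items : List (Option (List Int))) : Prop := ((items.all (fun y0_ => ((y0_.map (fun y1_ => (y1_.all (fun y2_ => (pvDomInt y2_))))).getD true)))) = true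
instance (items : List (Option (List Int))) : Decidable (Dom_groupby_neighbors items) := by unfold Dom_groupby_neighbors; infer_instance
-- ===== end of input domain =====

-- B replaces A's single-pass result/collected accumulator loop by two staged
-- passes: enumerate the separator indices, then slice between consecutive
-- boundaries and flatten each slice of length > 0; same O(n) cost.

-- ===== PORT A =====
-- `item in (None, [], '')`: on Option (List Int) this holds exactly for none and some [].
def pvIsSep (x : Option (List Int)) : Bool :=
  match x with
  | none => true
  | some [] => true
  | some (_ :: _) => false

-- one iteration of A's for-loop over state (result, collected)
def pvStepA (p : List (List Int) × List Int) (item : Option (List Int)) :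
    List (List Int) × List Int :=
  if pvIsSep item = false then (p.1, p.2 ++ item.getD [])
  else if p.2 ≠ [] then (p.1 ++ [p.2], []) else p

def groupby_neighbors (items : List (Option (List Int))) : List (List Int) :=
  if items = [] then []
  else
    let st := items.foldl pvStepA ([], [])
    if st.2 ≠ [] then st.1 ++ [st.2] else st.1

-- ===== PORT B =====
-- [x for it in run for x in it]: every it in a sliced run is a non-separator,
-- hence an actual list, so iterating it is exactly .getD [] here.
def pvFlat (l : List (Option (List Int))) : List Int :=
  l.flatMap (fun o => o.getD [])

-- seps = [i for i, it in enumerate(items) if it in (None, [], '')]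
def pvSepIdxs (items : List (Option (List Int))) : List Int :=
  (PySem.List.enumerate items).filterMap
    (fun p => if pvIsSep p.2 then some p.1 else none)

-- bounds = [-1] + seps + [len(items)]
def pvBounds (items : List (Option (List Int))) : List Int :=
  -1 :: pvSepIdxs items ++ [(items.length : Int)]

def groupby_neighbors_alt (items : List (Option (List Int))) : List (List Int) :=
  ((pvBounds items).zip (PySem.List.slice (pvBounds items) (some 1) none)).filterMap
    (fun p => if p.2 - p.1 > 1 then
        some (pvFlat (PySem.List.slice items (some (p.1 + 1)) (some p.2)))
      else none)

-- ===== PRECONDITION & SPEC =====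
def Spec_groupby_neighbors (items : List (Option (List Int))) (out : List (List Int)) : Prop := out = groupby_neighbors_alt items
instance (items : List (Option (List Int))) (out : List (List Int)) : Decidable (Spec_groupby_neighbors items out) := by unfold Spec_groupby_neighbors; infer_instance

-- ===== CLAIM =====
def Claim_equal_groupby_neighbors : Prop := ∀ (items : List (Option (List Int))), Dom_groupby_neighbors items → Spec_groupby_neighbors items (groupby_neighbors items)

-- ===== LEMMAS AND PROOFS =====

-- functional form of A's loop
def pvH (c : List Int) : List (Option (List Int)) → List (List Int)
  | [] => if c = [] then [] else [c]
  | x :: xs =>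
    if pvIsSep x = false then pvH (c ++ x.getD []) xs
    else if c = [] then pvH [] xs else c :: pvH [] xs

theorem pvFold_eq_H (items : List (Option (List Int))) :
    ∀ (r : List (List Int)) (c : List Int),
      (let st := items.foldl pvStepA (r, c);
       if st.2 ≠ [] then st.1 ++ [st.2] else st.1) = r ++ pvH c items := by
  induction items with
  | nil =>
    intro r c
    simp only [List.foldl_nil, pvH]
    by_cases hc : c = [] <;> simp [hc]
  | cons x xs ih =>
    intro r c
    simp only [List.foldl_cons, pvH, pvStepA]
    by_cases hx : pvIsSep x = false
    · simp only [hx, ite_true]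
      exact ih r (c ++ x.getD [])
    · have hx' : pvIsSep x = true := by revert hx; cases pvIsSep x <;> simp
      by_cases hc : c = []
      · simp [hx', hc, ih]
      · simp only [hx', Bool.true_eq_false, if_false, hc, ne_eq, not_false_eq_true, if_pos]
        rw [ih (r ++ [c]) []]
        simp

theorem pvA_eq_H (items : List (Option (List Int))) :
    groupby_neighbors items = pvH [] items := by
  unfold groupby_neighbors
  by_cases h : items = []
  · simp [h, pvH]
  · rw [if_neg h]
    simpa using pvFold_eq_H items [] []

-- canonical chunk decomposition: all chunks between separators, empties included
def pvChunks : List (Option (List Int)) → List (List Int)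
  | [] => [[]]
  | x :: xs =>
    if pvIsSep x then [] :: pvChunks xs
    else
      match pvChunks xs with
      | [] => [x.getD []]
      | c :: t => (x.getD [] ++ c) :: t

theorem pvChunks_ne_nil (xs : List (Option (List Int))) : pvChunks xs ≠ [] := by
  cases xs with
  | nil => simp [pvChunks]
  | cons x xs =>
    simp only [pvChunks]
    split
    · simp
    · split <;> simp

def pvPrepend (c : List Int) : List (List Int) → List (List Int)
  | [] => [c]
  | h :: t => (c ++ h) :: t

theorem pvH_eq_chunks (xs : List (Option (List Int))) :
    ∀ c, pvH c xs = (pvPrepend c (pvChunks xs)).filter (fun l => !l.isEmpty) := by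
  induction xs with
  | nil =>
    intro c
    simp only [pvH, pvChunks, pvPrepend, List.append_nil, List.filter]
    cases c <;> simp
  | cons x xs ih =>
    intro c
    by_cases hx : pvIsSep x = true
    · have h := pvChunks_ne_nil xs
      simp only [pvH, hx, Bool.true_eq_false, if_false, pvChunks, ite_true, pvPrepend]
      have ht : pvH [] xs = (pvChunks xs).filter (fun l => !l.isEmpty) := by
        rw [ih []]
        cases hcs : pvChunks xs with
        | nil => exact absurd hcs h
        | cons a t => simp [pvPrepend]
      by_cases hc : c = []
      · simp [hc, List.filter, ht]
      · have : (c.isEmpty) = false := by cases c <;> simp_all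
        simp [List.filter, this, ht, hc]
    · have hx' : pvIsSep x = false := by revert hx; cases pvIsSep x <;> simp
      simp only [pvH, hx', ite_true, pvChunks, Bool.false_eq_true, if_false]
      rw [ih (c ++ x.getD [])]
      cases hcs : pvChunks xs with
      | nil => exact absurd hcs (pvChunks_ne_nil xs)
      | cons a t => simp [pvPrepend, List.append_assoc]

-- flattening a run of non-separators is empty iff the run is empty
theorem pvFlat_eq_nil (g : List (Option (List Int)))
    (hg : ∀ y ∈ g, pvIsSep y = false) : (pvFlat g = []) ↔ g = [] := by
  cases g with
  | nil => simp [pvFlat]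
  | cons y g =>
    have hy : pvIsSep y = false := hg y (by simp)
    have : y.getD [] ≠ [] := by
      cases y with
      | none => simp [pvIsSep] at hy
      | some l => cases l with
        | nil => simp [pvIsSep] at hy
        | cons a l => simp
    simp only [pvFlat, List.flatMap_cons]
    constructor
    · intro h
      exact absurd (List.append_eq_nil_iff.mp h).1 this
    · intro h; simp at h

-- proof-side sep-index and pair-fold forms of B
def pvSeps (k : Nat) : List (Option (List Int)) → List Int
  | [] => []
  | x :: xs => if pvIsSep x then (k : Int) :: pvSeps (k + 1) xs else pvSeps (k + 1) xs

def pvRuns (its : List (Option (List Int))) (a : Int) :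
    List Int → Int → List (List Int)
  | [], n =>
    if n - a > 1 then [pvFlat (PySem.List.slice its (some (a + 1)) (some n))] else []
  | s :: ss, n =>
    (if s - a > 1 then [pvFlat (PySem.List.slice its (some (a + 1)) (some s))] else [])
      ++ pvRuns its s ss n

theorem pvEnum_eq_seps (xs : List (Option (List Int))) :
    ∀ (k : Nat),
      (PySem.List.enumerate xs (k : Int)).filterMap
          (fun p => if pvIsSep p.2 then some p.1 else none)
        = pvSeps k xs := by
  induction xs with
  | nil => intro k; simp [PySem.List.enumerate_nil, pvSeps]
  | cons x xs ih =>
    intro k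
    rw [PySem.List.enumerate_cons, List.filterMap_cons,
      show ((k : Int) + 1) = ((k + 1 : Nat) : Int) by push_cast; ring, ih (k + 1)]
    by_cases hx : pvIsSep x <;> simp [pvSeps, hx]

theorem pvZip_eq_runs (its : List (Option (List Int))) (n : Int) :
    ∀ (seps : List Int) (a : Int),
      (((a :: seps ++ [n]).zip ((a :: seps ++ [n]).tail)).filterMap
        (fun p => if p.2 - p.1 > 1 then
            some (pvFlat (PySem.List.slice its (some (p.1 + 1)) (some p.2)))
          else none))
        = pvRuns its a seps n := by
  intro seps
  induction seps with
  | nil =>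
    intro a
    by_cases h : n - a > 1 <;> simp [pvRuns, h]
  | cons s ss ih =>
    intro a
    simp only [List.cons_append, List.tail_cons, List.zip_cons_cons, List.filterMap_cons]
    have := ih s
    simp only [List.cons_append, List.tail_cons] at this
    by_cases h : s - a > 1 <;> simp [pvRuns, h, this]

theorem pvRuns_eq_chunks (xs : List (Option (List Int))) :
    ∀ (pre cur : List (Option (List Int))), (∀ y ∈ cur, pvIsSep y = false) →
      pvRuns (pre ++ cur ++ xs) ((pre.length : Int) - 1)
          (pvSeps (pre.length + cur.length) xs)
          ((pre.length : Int) + cur.length + xs.length)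
        = (pvPrepend (pvFlat cur) (pvChunks xs)).filter (fun l => !l.isEmpty) := by
  induction xs with
  | nil =>
    intro pre cur hcur
    simp only [pvSeps, pvRuns, pvChunks, pvPrepend, List.append_nil]
    rw [show ((pre.length : Int) - 1 + 1) = ((pre.length : Nat) : Int) by ring,
      show ((pre.length : Int) + cur.length + ([] : List (Option (List Int))).length)
        = (((pre.length + cur.length : Nat)) : Int) by push_cast; simp,
      PySem.List.slice_natCast, List.drop_left, List.take_of_length_le (by omega)]
    by_cases hc : cur = []
    · simp [hc, pvFlat]
    · have hne : pvFlat cur ≠ [] := fun h => hc ((pvFlat_eq_nil cur hcur).mp h)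
      have hcl : cur.length ≠ 0 := by simpa using hc
      simp [List.filter]
      cases hf : pvFlat cur with
      | nil => exact absurd hf hne
      | cons z zs => simp [Nat.pos_of_ne_zero hcl]
  | cons x xs ih =>
    intro pre cur hcur
    by_cases hx : pvIsSep x = true
    · -- separator: the current run cur is flushed, recurse with an empty run
      simp only [pvSeps, hx, ite_true, pvRuns, pvChunks, pvPrepend, pvFlat, List.length_cons]
      have harith : ((pre.length + cur.length : Nat) : Int) - ((pre.length : Int) - 1)
          = (cur.length : Int) + 1 := by push_cast; ring
      have hsl : PySem.List.slice (pre ++ cur ++ x :: xs)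
          (some ((pre.length : Int) - 1 + 1)) (some ((pre.length + cur.length : Nat) : Int))
          = cur := by
        rw [show ((pre.length : Int) - 1 + 1) = ((pre.length : Nat) : Int) by ring,
          PySem.List.slice_natCast, List.append_assoc, List.drop_left]
        rw [show pre.length + cur.length - pre.length = cur.length by omega]
        simp
      have hih := ih (pre ++ cur ++ [x]) [] (by simp)
      simp only [List.length_append, List.length_cons, List.length_nil,
        Nat.zero_add, Nat.cast_zero, add_zero, List.append_nil, pvFlat, List.flatMap_nil,
        pvPrepend] at hih
      rw [show pre ++ cur ++ [x] ++ xs = pre ++ cur ++ x :: xs by simp,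
        show (((pre.length + cur.length + 1 : Nat)) : Int) - 1
          = ((pre.length + cur.length : Nat) : Int) by push_cast; ring] at hih
      rw [show ((pre.length : Int) + (cur.length : Int) + ((xs.length + 1 : Nat) : Int))
          = (((pre.length + cur.length + 1 : Nat)) : Int) + (xs.length : Int) by
        push_cast; ring]
      rw [hih, hsl]
      have hchunks : (match pvChunks xs with
          | [] => [([] : List Int)]
          | h :: t => ([] ++ h) :: t).filter (fun l => !l.isEmpty)
          = (pvChunks xs).filter (fun l => !l.isEmpty) := by
        cases hcs : pvChunks xs with
        | nil => exact absurd hcs (pvChunks_ne_nil xs)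
        | cons a t => simp
      rw [hchunks]
      by_cases hc : cur = []
      · have hcond : ¬ (((pre.length + cur.length : Nat) : Int) - ((pre.length : Int) - 1) > 1) := by
          rw [harith]; simp [hc]
        simp [hc, List.filter]
      · have hne : cur.flatMap (fun o => o.getD []) ≠ [] :=
          fun h => hc ((pvFlat_eq_nil cur hcur).mp h)
        have hcl : cur.length ≠ 0 := by simpa using hc
        have hcond : (((pre.length + cur.length : Nat) : Int) - ((pre.length : Int) - 1) > 1) := by
          rw [harith]; omega
        rw [if_pos hcond]
        cases hf : cur.flatMap (fun o => o.getD []) with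
        | nil => exact absurd hf hne
        | cons z zs => simp [List.filter]
    · -- non-separator: x is absorbed into the current run
      have hx' : pvIsSep x = false := by revert hx; cases pvIsSep x <;> simp
      simp only [pvSeps, hx', Bool.false_eq_true, if_false, pvChunks, List.length_cons]
      have hih := ih pre (cur ++ [x]) (by
        intro y hy
        rcases List.mem_append.mp hy with h | h
        · exact hcur y h
        · simp at h; subst h; exact hx')
      rw [show pre ++ (cur ++ [x]) ++ xs = pre ++ cur ++ x :: xs by simp,
        show pre.length + (cur ++ [x]).length = pre.length + cur.length + 1 by
          simp; omega,
        show ((pre.length : Int) + ((cur ++ [x]).length : Int) + (xs.length : Int))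
          = ((pre.length : Int) + (cur.length : Int) + (((xs.length + 1 : Nat)) : Int)) by
          push_cast; simp; ring] at hih
      rw [hih]
      have hflat : pvFlat (cur ++ [x]) = pvFlat cur ++ x.getD [] := by
        simp [pvFlat]
      cases hcs : pvChunks xs with
      | nil => exact absurd hcs (pvChunks_ne_nil xs)
      | cons a t => simp [pvPrepend, hflat, List.append_assoc]

-- ===== VERDICT =====
theorem groupby_neighbors_spec : Claim_equal_groupby_neighbors := by
  intro items _
  unfold Spec_groupby_neighbors groupby_neighbors_alt
  rw [pvA_eq_H]
  unfold pvBounds pvSepIdxs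
  rw [PySem.List.slice_from_one,
    show (0 : Int) = ((0 : Nat) : Int) by norm_num, pvEnum_eq_seps items 0,
    pvZip_eq_runs items (items.length : Int) (pvSeps 0 items) (-1)]
  have h := pvRuns_eq_chunks items [] [] (by simp)
  simp only [List.nil_append, List.length_nil, Nat.cast_zero, zero_sub,
    zero_add, pvFlat, List.flatMap_nil] at h
  rw [h, pvH_eq_chunks items []]
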